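-- pv_equiv track=rewrite | github.com/MendozaLab/erdos-experiments | scripts/erdos-86/solve_c4free_hypercube.py | hypercube_squares
-- ===== SOURCE A (Python) =====
-- from itertools import combinations
--
-- def hypercube_squares(n):
--     """
--     Return all C4 squares in Q_n.
--     Each square is defined by a base vertex v (with bits i,j both 0)
--     and two dimensions i < j.
--     Returns list of 4-tuples of edges forming each square.
--     """
--     squares = []
--     for i, j in combinations(range(n), 2):
--         mask_i = 1 << i
--         mask_j = 1 << j
--         # Iterate over vertices with bits i and j both 0
--         for v in range(2**n):
--             if (v & mask_i) or (v & mask_j):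
--                 continue
--             # The 4 vertices of the square
--             v00 = v
--             v10 = v ^ mask_i
--             v01 = v ^ mask_j
--             v11 = v ^ mask_i ^ mask_j
--             # The 4 edges (sorted)
--             e1 = (min(v00, v10), max(v00, v10))
--             e2 = (min(v00, v01), max(v00, v01))
--             e3 = (min(v10, v11), max(v10, v11))
--             e4 = (min(v01, v11), max(v01, v11))
--             squares.append((e1, e2, e3, e4))
--     return squares
-- ===== SOURCE B (Python) =====
-- from itertools import combinations
--
-- def hypercube_squares(n):
--     # Direct enumeration: for each dimension pair (i,j) split the base vertex
--     # v into high / middle / low blocks around bits j and i, so no vertex is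
--     # ever generated and skipped; edges come from | since bits i,j of v are 0.
--     squares = []
--     for i, j in combinations(range(n), 2):
--         mask_i = 1 << i
--         mask_j = 1 << j
--         for hi in range(2**n // (mask_j * 2)):
--             for mid in range(mask_j // (mask_i * 2)):
--                 for lo in range(mask_i):
--                     v = hi * (mask_j * 2) + mid * (mask_i * 2) + lo
--                     v10 = v | mask_i
--                     v01 = v | mask_j
--                     v11 = v10 | mask_j
--                     squares.append(((v, v10), (v, v01), (v10, v11), (v01, v11)))
--     return squares
-- ===== Notes on version B (the rewrite author's own statement) =====
-- stated objective: alternative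
-- what changed: Instead of scanning every vertex per dimension pair and skipping those with bit i or j set, B composes each base vertex directly from high/middle/low blocks around bits j and i (three nested ranges, no skip test), and builds the four edges with bitwise-or on the known-clear bits instead of xor plus min/max.
import Mathlib
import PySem

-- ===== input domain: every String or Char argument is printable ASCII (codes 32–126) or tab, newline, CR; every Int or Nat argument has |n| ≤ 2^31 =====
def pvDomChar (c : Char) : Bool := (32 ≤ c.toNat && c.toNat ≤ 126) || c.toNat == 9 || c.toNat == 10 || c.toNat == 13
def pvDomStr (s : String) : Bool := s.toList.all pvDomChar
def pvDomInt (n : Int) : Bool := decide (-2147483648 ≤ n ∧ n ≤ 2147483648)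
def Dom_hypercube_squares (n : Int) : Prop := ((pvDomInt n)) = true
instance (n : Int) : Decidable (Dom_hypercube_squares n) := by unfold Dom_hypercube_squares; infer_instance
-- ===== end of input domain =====

-- B enumerates the base vertices directly (high/middle/low blocks around bits j and i,
-- no skip test) instead of scanning all vertices and skipping; edges via bitwise-or.


-- ===== PORT A =====
def hypercube_squares (n : Int) : List ((Int × Int) × (Int × Int) × (Int × Int) × (Int × Int)) :=
  -- combinations(range(n), 2): pairs (i, j) with i < j in lexicographic order
  let pairs : List (Int × Int) :=
    (PySem.List.pyRange 0 n 1).flatMap (fun i =>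
      (PySem.List.pyRange (i + 1) n 1).map (fun j => (i, j)))
  pairs.foldl (fun squares ij =>
    let i := ij.1
    let j := ij.2
    let mask_i : Int := 1 <<< i.toNat   -- 1 << i  (i ≥ 0 here)
    let mask_j : Int := 1 <<< j.toNat
    (PySem.List.pyRange 0 ((2 : Int) ^ n.toNat) 1).foldl (fun squares v =>
      if PySem.Int.band v mask_i != 0 || PySem.Int.band v mask_j != 0 then
        squares
      else
        let v00 := v
        let v10 := PySem.Int.bxor v mask_i
        let v01 := PySem.Int.bxor v mask_j
        let v11 := PySem.Int.bxor (PySem.Int.bxor v mask_i) mask_j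
        let e1 := (min v00 v10, max v00 v10)
        let e2 := (min v00 v01, max v00 v01)
        let e3 := (min v10 v11, max v10 v11)
        let e4 := (min v01 v11, max v01 v11)
        squares ++ [(e1, e2, e3, e4)]) squares) []

-- ===== PORT B =====
def hypercube_squares_alt (n : Int) : List ((Int × Int) × (Int × Int) × (Int × Int) × (Int × Int)) :=
  let pairs : List (Int × Int) :=
    (PySem.List.pyRange 0 n 1).flatMap (fun i =>
      (PySem.List.pyRange (i + 1) n 1).map (fun j => (i, j)))
  pairs.foldl (fun squares ij =>
    let i := ij.1
    let j := ij.2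
    let mask_i : Int := 1 <<< i.toNat
    let mask_j : Int := 1 <<< j.toNat
    (PySem.List.pyRange 0 (PySem.Int.floordiv ((2 : Int) ^ n.toNat) (mask_j * 2)) 1).foldl (fun squares hi =>
      (PySem.List.pyRange 0 (PySem.Int.floordiv mask_j (mask_i * 2)) 1).foldl (fun squares mid =>
        (PySem.List.pyRange 0 mask_i 1).foldl (fun squares lo =>
          let v := hi * (mask_j * 2) + mid * (mask_i * 2) + lo
          let v10 := PySem.Int.bor v mask_i
          let v01 := PySem.Int.bor v mask_j
          let v11 := PySem.Int.bor v10 mask_j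
          squares ++ [((v, v10), (v, v01), (v10, v11), (v01, v11))]) squares) squares) squares) []

-- ===== PRECONDITION & SPEC =====
def Spec_hypercube_squares (n : Int) (out : List ((Int × Int) × (Int × Int) × (Int × Int) × (Int × Int))) : Prop := out = hypercube_squares_alt n
instance (n : Int) (out : List ((Int × Int) × (Int × Int) × (Int × Int) × (Int × Int))) : Decidable (Spec_hypercube_squares n out) := by unfold Spec_hypercube_squares; infer_instance

-- ===== CLAIM (what is proved, stated in full; the proofs are below) =====
def Claim_equal_hypercube_squares : Prop := ∀ (n : Int), Dom_hypercube_squares n → Spec_hypercube_squares n (hypercube_squares n)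

-- ===== LEMMAS AND PROOFS =====

-- loop with 'continue': fold of if-skip is append of map-over-filter
theorem pvFoldlSkip {α β : Type} (l : List α) (p : α → Bool) (f : α → β) (acc : List β) :
    l.foldl (fun acc x => if p x then acc else acc ++ [f x]) acc
      = acc ++ (l.filter (fun x => !p x)).map f := by
  induction l generalizing acc with
  | nil => simp
  | cons x xs ih => by_cases h : p x <;> simp [h, ih]

-- fold whose body appends a block is a flatMap
theorem pvFoldlFlatMap {α β : Type} (l : List α) (body : List β → α → List β)
    (g : α → List β) (h : ∀ acc x, body acc x = acc ++ g x) (acc : List β) :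
    l.foldl body acc = acc ++ l.flatMap g := by
  induction l generalizing acc with
  | nil => simp
  | cons x xs ih => rw [List.foldl_cons, h, ih, List.flatMap_cons, List.append_assoc]

-- range of a product as nested ranges
theorem pvRangeMul (a b : Nat) :
    List.range (a * b) = (List.range a).flatMap (fun c => (List.range b).map (fun d => c * b + d)) := by
  induction a with
  | zero => simp
  | succ a ih =>
    rw [Nat.succ_mul, List.range_add, ih, List.range_succ, List.flatMap_append]
    simp

theorem pvAndTwoPowOfLt {d p : Nat} (h : d < 2 ^ p) : d &&& 2 ^ p = 0 := by
  simp [Nat.and_two_pow, Nat.testBit_lt_two_pow h]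

theorem pvTestBitOfGeLt {d p : Nat} (h1 : 2 ^ p ≤ d) (h2 : d < 2 ^ (p + 1)) :
    d.testBit p = true := by
  rw [Nat.testBit_eq_decide_div_mod_eq]
  have hd : d / 2 ^ p = 1 := by
    have h2' : d < 2 ^ p * 2 := by rw [← pow_succ]; exact h2
    apply Nat.div_eq_of_lt_le
    · simpa using h1
    · omega
  simp [hd]

-- filtering the top bit off range (2^(p+1)) leaves range (2^p)
theorem pvFilterTopBit (p : Nat) :
    (List.range (2 ^ (p + 1))).filter (fun d => d &&& 2 ^ p == 0) = List.range (2 ^ p) := by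
  have : 2 ^ (p + 1) = 2 ^ p + 2 ^ p := by ring
  rw [this, List.range_add, List.filter_append]
  have h1 : (List.range (2 ^ p)).filter (fun d => d &&& 2 ^ p == 0) = List.range (2 ^ p) := by
    apply List.filter_eq_self.mpr
    intro d hd
    simp [pvAndTwoPowOfLt (List.mem_range.mp hd)]
  have h2 : ((List.range (2 ^ p)).map (2 ^ p + ·)).filter (fun d => d &&& 2 ^ p == 0) = [] := by
    apply List.filter_eq_nil_iff.mpr
    intro d hd
    simp only [List.mem_map, List.mem_range] at hd
    obtain ⟨e, he, rfl⟩ := hd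
    have : (2 ^ p + e).testBit p = true :=
      pvTestBitOfGeLt (Nat.le_add_right _ _) (by rw [pow_succ]; omega)
    simp [Nat.and_two_pow, this]
  rw [h1, h2, List.append_nil]

-- adding a multiple of a strictly higher power does not change a low bit
theorem pvAndMulPowAdd {p j : Nat} (hp : p ≤ j) (c d : Nat) :
    (c * 2 ^ (j + 1) + d) &&& 2 ^ p = d &&& 2 ^ p := by
  have hbit : (c * 2 ^ (j + 1) + d).testBit p = d.testBit p := by
    rw [Nat.testBit_eq_decide_div_mod_eq, Nat.testBit_eq_decide_div_mod_eq]
    have hsplit : 2 ^ (j + 1) = 2 ^ p * (2 * 2 ^ (j - p)) := by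
      rw [← pow_succ', ← pow_add]
      congr 1
      omega
    have hdiv : (c * 2 ^ (j + 1) + d) / 2 ^ p = d / 2 ^ p + c * (2 * 2 ^ (j - p)) := by
      have he : c * 2 ^ (j + 1) + d = d + 2 ^ p * (c * (2 * 2 ^ (j - p))) := by rw [hsplit]; ring
      rw [he, Nat.add_mul_div_left _ _ (Nat.two_pow_pos p)]
    rw [hdiv]
    have hm : (d / 2 ^ p + c * (2 * 2 ^ (j - p))) % 2 = d / 2 ^ p % 2 := by
      have he : c * (2 * 2 ^ (j - p)) = c * 2 ^ (j - p) * 2 := by ring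
      rw [he, Nat.add_mul_mod_self_right]
    rw [hm]
  rw [Nat.and_two_pow, Nat.and_two_pow, hbit]

-- the vertex set with bits I and J clear, enumerated in order, as three nested blocks
theorem pvKeyFilter (I J N : Nat) (hij : I < J) (hjn : J < N) :
    (List.range (2 ^ N)).filter (fun v => v &&& 2 ^ I == 0 && v &&& 2 ^ J == 0)
    = (List.range (2 ^ (N - (J + 1)))).flatMap (fun c =>
        (List.range (2 ^ (J - (I + 1)))).flatMap (fun b =>
          (List.range (2 ^ I)).map (fun a => c * 2 ^ (J + 1) + (b * 2 ^ (I + 1) + a)))) := by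
  have h1 : (2 : Nat) ^ N = 2 ^ (N - (J + 1)) * 2 ^ (J + 1) := by
    rw [← pow_add]; congr 1; omega
  have h2 : (2 : Nat) ^ J = 2 ^ (J - (I + 1)) * 2 ^ (I + 1) := by
    rw [← pow_add]; congr 1; omega
  have hinner : (List.range (2 ^ (J + 1))).filter
      (fun d => d &&& 2 ^ I == 0 && d &&& 2 ^ J == 0)
      = (List.range (2 ^ (J - (I + 1)))).flatMap (fun b =>
          (List.range (2 ^ I)).map (fun a => b * 2 ^ (I + 1) + a)) := by
    rw [← List.filter_filter, pvFilterTopBit J]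
    rw [h2, pvRangeMul, List.filter_flatMap]
    congr 1
    funext b
    rw [List.filter_map]
    have : ((fun d => d &&& 2 ^ I == 0) ∘ (fun d => b * 2 ^ (I + 1) + d))
        = (fun d => d &&& 2 ^ I == 0) := by
      funext d
      simp [pvAndMulPowAdd (Nat.le_refl I) b d]
    rw [this, pvFilterTopBit I]
  rw [h1, pvRangeMul, List.filter_flatMap]
  congr 1
  funext c
  rw [List.filter_map]
  have hcomp : ((fun v => v &&& 2 ^ I == 0 && v &&& 2 ^ J == 0) ∘ (fun d => c * 2 ^ (J + 1) + d))
      = (fun d => d &&& 2 ^ I == 0 && d &&& 2 ^ J == 0) := by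
    funext d
    simp [pvAndMulPowAdd (Nat.le_of_lt hij) c d, pvAndMulPowAdd (Nat.le_refl J) c d]
  rw [hcomp, hinner, List.map_flatMap]
  congr 1
  funext b
  rw [List.map_map]
  rfl

-- xor with a clear bit is or
theorem pvXorOr {v p : Nat} (h : v.testBit p = false) : v ^^^ 2 ^ p = v ||| 2 ^ p := by
  apply Nat.eq_of_testBit_eq
  intro i
  by_cases hip : p = i
  · subst hip
    simp [Nat.testBit_xor, Nat.testBit_or, h]
  · simp [Nat.testBit_xor, Nat.testBit_or, hip]

theorem pvXorOr2 {v p q : Nat} (hp : v.testBit p = false) (hq : v.testBit q = false)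
    (hpq : p ≠ q) : (v ^^^ 2 ^ p) ^^^ 2 ^ q = (v ||| 2 ^ p) ||| 2 ^ q := by
  have h1 : (v ^^^ 2 ^ p).testBit q = false := by
    simp [Nat.testBit_xor, Nat.testBit_two_pow, hq]
    omega
  rw [pvXorOr h1, pvXorOr hp]

theorem pvFoldl3 {α β γ R : Type} (l1 : List α) (l2 : List β) (l3 : List γ)
    (t : α → β → γ → R) (acc : List R) :
    l1.foldl (fun a1 x => l2.foldl (fun a2 y => l3.foldl (fun a3 z => a3 ++ [t x y z]) a2) a1) acc
      = acc ++ l1.flatMap (fun x => l2.flatMap (fun y => l3.map (fun z => t x y z))) := by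
  apply pvFoldlFlatMap
  intro a1 x
  apply pvFoldlFlatMap
  intro a2 y
  rw [pvFoldlFlatMap l3 _ (fun z => [t x y z]) (fun _ _ => rfl) a2]
  congr 1
  induction l3 with
  | nil => rfl
  | cons z zs ih => simp [ih]

-- v &&& 2^p = 0 means bit p is clear
theorem pvTestBitFalseOfAnd {v p : Nat} (h : v &&& 2 ^ p = 0) : v.testBit p = false := by
  rw [Nat.and_two_pow] at h
  rcases Nat.mul_eq_zero.mp h with h' | h'
  · cases hb : v.testBit p
    · rfl
    · rw [hb] at h'; simp at h'
  · exact absurd h' (Nat.two_pow_pos p).ne'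

theorem pvCastPow (K : Nat) : ((2 : Int)) ^ K = ((2 ^ K : Nat) : Int) := by
  push_cast
  ring

-- the four edges of one square: xor/min/max form = or form, when bits I and J of v are clear
theorem pvSquareEq (I J v : Nat) (hIJ : I < J) (hI : v &&& 2 ^ I = 0) (hJ : v &&& 2 ^ J = 0) :
    ((min ((v : Nat) : Int) (PySem.Int.bxor ((v : Nat) : Int) ((2 ^ I : Nat) : Int)), max ((v : Nat) : Int) (PySem.Int.bxor ((v : Nat) : Int) ((2 ^ I : Nat) : Int))),
      (min ((v : Nat) : Int) (PySem.Int.bxor ((v : Nat) : Int) ((2 ^ J : Nat) : Int)), max ((v : Nat) : Int) (PySem.Int.bxor ((v : Nat) : Int) ((2 ^ J : Nat) : Int))),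
      (min (PySem.Int.bxor ((v : Nat) : Int) ((2 ^ I : Nat) : Int)) (PySem.Int.bxor (PySem.Int.bxor ((v : Nat) : Int) ((2 ^ I : Nat) : Int)) ((2 ^ J : Nat) : Int)),
        max (PySem.Int.bxor ((v : Nat) : Int) ((2 ^ I : Nat) : Int)) (PySem.Int.bxor (PySem.Int.bxor ((v : Nat) : Int) ((2 ^ I : Nat) : Int)) ((2 ^ J : Nat) : Int))),
      min (PySem.Int.bxor ((v : Nat) : Int) ((2 ^ J : Nat) : Int)) (PySem.Int.bxor (PySem.Int.bxor ((v : Nat) : Int) ((2 ^ I : Nat) : Int)) ((2 ^ J : Nat) : Int)),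
      max (PySem.Int.bxor ((v : Nat) : Int) ((2 ^ J : Nat) : Int)) (PySem.Int.bxor (PySem.Int.bxor ((v : Nat) : Int) ((2 ^ I : Nat) : Int)) ((2 ^ J : Nat) : Int)))
    = ((((v : Nat) : Int), PySem.Int.bor ((v : Nat) : Int) ((2 ^ I : Nat) : Int)),
        (((v : Nat) : Int), PySem.Int.bor ((v : Nat) : Int) ((2 ^ J : Nat) : Int)),
        (PySem.Int.bor ((v : Nat) : Int) ((2 ^ I : Nat) : Int), PySem.Int.bor (PySem.Int.bor ((v : Nat) : Int) ((2 ^ I : Nat) : Int)) ((2 ^ J : Nat) : Int)),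
        PySem.Int.bor ((v : Nat) : Int) ((2 ^ J : Nat) : Int), PySem.Int.bor (PySem.Int.bor ((v : Nat) : Int) ((2 ^ I : Nat) : Int)) ((2 ^ J : Nat) : Int)) := by
  have tI : v.testBit I = false := pvTestBitFalseOfAnd hI
  have tJ : v.testBit J = false := pvTestBitFalseOfAnd hJ
  simp only [PySem.Int.bxor_natCast, PySem.Int.bor_natCast]
  rw [pvXorOr2 tI tJ (by omega), pvXorOr tI, pvXorOr tJ]
  have e : (v ||| 2 ^ I) ||| 2 ^ J = (v ||| 2 ^ J) ||| 2 ^ I := by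
    rw [Nat.lor_assoc, Nat.lor_assoc, Nat.lor_comm (2 ^ I)]
  have hle1 : ((v : Nat) : Int) ≤ ↑(v ||| 2 ^ I) := by exact_mod_cast Nat.left_le_or
  have hle2 : ((v : Nat) : Int) ≤ ↑(v ||| 2 ^ J) := by exact_mod_cast Nat.left_le_or
  have hle3 : ((v ||| 2 ^ I : Nat) : Int) ≤ ↑((v ||| 2 ^ I) ||| 2 ^ J) := by exact_mod_cast Nat.left_le_or
  have hle4 : ((v ||| 2 ^ J : Nat) : Int) ≤ ↑((v ||| 2 ^ I) ||| 2 ^ J) := by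
    rw [e]
    exact_mod_cast Nat.left_le_or
  rw [min_eq_left hle1, max_eq_right hle1, min_eq_left hle2, max_eq_right hle2,
    min_eq_left hle3, max_eq_right hle3, min_eq_left hle4, max_eq_right hle4]

theorem pvPairEq (I J N : Nat) (hIJ : I < J) (hJN : J < N) :
    List.map
      (fun v =>
        ((min v (PySem.Int.bxor v ((2 ^ I : Nat) : Int)), max v (PySem.Int.bxor v ((2 ^ I : Nat) : Int))),
          (min v (PySem.Int.bxor v ((2 ^ J : Nat) : Int)), max v (PySem.Int.bxor v ((2 ^ J : Nat) : Int))),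
          (min (PySem.Int.bxor v ((2 ^ I : Nat) : Int)) (PySem.Int.bxor (PySem.Int.bxor v ((2 ^ I : Nat) : Int)) ((2 ^ J : Nat) : Int)),
            max (PySem.Int.bxor v ((2 ^ I : Nat) : Int)) (PySem.Int.bxor (PySem.Int.bxor v ((2 ^ I : Nat) : Int)) ((2 ^ J : Nat) : Int))),
          min (PySem.Int.bxor v ((2 ^ J : Nat) : Int)) (PySem.Int.bxor (PySem.Int.bxor v ((2 ^ I : Nat) : Int)) ((2 ^ J : Nat) : Int)),
          max (PySem.Int.bxor v ((2 ^ J : Nat) : Int)) (PySem.Int.bxor (PySem.Int.bxor v ((2 ^ I : Nat) : Int)) ((2 ^ J : Nat) : Int))))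
      (List.filter (fun x => !(PySem.Int.band x ((2 ^ I : Nat) : Int) != 0 || PySem.Int.band x ((2 ^ J : Nat) : Int) != 0))
        (PySem.List.pyRange 0 ((2 ^ N : Nat) : Int) 1)) =
    List.flatMap
      (fun x =>
        List.flatMap
          (fun y =>
            List.map
              (fun z =>
                ((x * (((2 ^ J : Nat) : Int) * 2) + y * (((2 ^ I : Nat) : Int) * 2) + z, PySem.Int.bor (x * (((2 ^ J : Nat) : Int) * 2) + y * (((2 ^ I : Nat) : Int) * 2) + z) ((2 ^ I : Nat) : Int)),
                  (x * (((2 ^ J : Nat) : Int) * 2) + y * (((2 ^ I : Nat) : Int) * 2) + z,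
                    PySem.Int.bor (x * (((2 ^ J : Nat) : Int) * 2) + y * (((2 ^ I : Nat) : Int) * 2) + z) ((2 ^ J : Nat) : Int)),
                  (PySem.Int.bor (x * (((2 ^ J : Nat) : Int) * 2) + y * (((2 ^ I : Nat) : Int) * 2) + z) ((2 ^ I : Nat) : Int),
                    PySem.Int.bor (PySem.Int.bor (x * (((2 ^ J : Nat) : Int) * 2) + y * (((2 ^ I : Nat) : Int) * 2) + z) ((2 ^ I : Nat) : Int)) ((2 ^ J : Nat) : Int)),
                  PySem.Int.bor (x * (((2 ^ J : Nat) : Int) * 2) + y * (((2 ^ I : Nat) : Int) * 2) + z) ((2 ^ J : Nat) : Int),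
                  PySem.Int.bor (PySem.Int.bor (x * (((2 ^ J : Nat) : Int) * 2) + y * (((2 ^ I : Nat) : Int) * 2) + z) ((2 ^ I : Nat) : Int)) ((2 ^ J : Nat) : Int)))
              (PySem.List.pyRange 0 ((2 ^ I : Nat) : Int) 1))
          (PySem.List.pyRange 0 (PySem.Int.floordiv ((2 ^ J : Nat) : Int) (((2 ^ I : Nat) : Int) * 2)) 1))
      (PySem.List.pyRange 0 (PySem.Int.floordiv ((2 ^ N : Nat) : Int) (((2 ^ J : Nat) : Int) * 2)) 1) := by
  have hm1 : (((2 ^ J : Nat) : Int) * 2) = ((2 ^ (J + 1) : Nat) : Int) := by push_cast; ring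
  have hm2 : (((2 ^ I : Nat) : Int) * 2) = ((2 ^ (I + 1) : Nat) : Int) := by push_cast; ring
  rw [hm1, hm2]
  rw [PySem.Int.floordiv_natCast, PySem.Int.floordiv_natCast]
  rw [Nat.pow_div (by omega) (by norm_num), Nat.pow_div (by omega) (by norm_num)]
  simp only [PySem.List.pyRange_zero_natCast]
  simp only [List.filter_map, List.map_map, List.flatMap_map]
  rw [List.filter_congr (q := fun v => v &&& 2 ^ I == 0 && v &&& 2 ^ J == 0)
    (by
      intro x _
      simp only [Function.comp, PySem.Int.band_natCast]
      generalize x &&& 2 ^ I = y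
      generalize x &&& 2 ^ J = z
      cases y <;> cases z <;> simp <;> omega)]
  rw [pvKeyFilter I J N hIJ hJN]
  simp only [List.map_flatMap, List.map_map]
  apply List.flatMap_congr
  intro c hc'
  apply List.flatMap_congr
  intro b hb'
  apply List.map_congr_left
  intro a ha'
  simp only [List.mem_range] at hc' hb' ha'
  simp only [Function.comp]
  have hv : ((c : Int) * (((2 : Nat) ^ (J + 1) : Nat) : Int) + (b : Int) * (((2 : Nat) ^ (I + 1) : Nat) : Int)
        + ((a : Nat) : Int)) = ((c * 2 ^ (J + 1) + (b * 2 ^ (I + 1) + a) : Nat) : Int) := by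
    push_cast
    ring
  rw [hv]
  have hblock : b * 2 ^ (I + 1) + a < 2 ^ J := by
    have h2i : a < 2 ^ (I + 1) := lt_of_lt_of_le ha' (Nat.pow_le_pow_right (by norm_num) (by omega))
    calc b * 2 ^ (I + 1) + a < (b + 1) * 2 ^ (I + 1) := by rw [Nat.succ_mul]; omega
      _ ≤ 2 ^ (J - (I + 1)) * 2 ^ (I + 1) := Nat.mul_le_mul_right _ hb'
      _ = 2 ^ J := by rw [← pow_add]; congr 1; omega
  have hI : (c * 2 ^ (J + 1) + (b * 2 ^ (I + 1) + a)) &&& 2 ^ I = 0 := by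
    rw [pvAndMulPowAdd (le_of_lt hIJ), pvAndMulPowAdd (le_refl I)]
    exact pvAndTwoPowOfLt ha'
  have hJ : (c * 2 ^ (J + 1) + (b * 2 ^ (I + 1) + a)) &&& 2 ^ J = 0 := by
    rw [pvAndMulPowAdd (le_refl J)]
    exact pvAndTwoPowOfLt hblock
  exact pvSquareEq I J _ hIJ hI hJ

theorem hypercube_squares_spec : Claim_equal_hypercube_squares := by
  intro n _
  unfold Spec_hypercube_squares hypercube_squares hypercube_squares_alt
  dsimp only
  apply PySem.List.foldl_congr_mem
  intro acc ij hmem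
  simp only [List.mem_flatMap, List.mem_map, PySem.List.mem_pyRange_one] at hmem
  obtain ⟨i, ⟨h0i, hin⟩, j, ⟨hij, hjn⟩, rfl⟩ := hmem
  dsimp only
  rw [pvFoldlSkip, pvFoldl3]
  obtain ⟨I, rfl⟩ := Int.eq_ofNat_of_zero_le h0i
  obtain ⟨J, rfl⟩ := Int.eq_ofNat_of_zero_le (by omega : (0:Int) ≤ j)
  obtain ⟨N, rfl⟩ := Int.eq_ofNat_of_zero_le (by omega : (0:Int) ≤ n)
  simp only [Int.toNat_natCast, Nat.shiftLeft_eq, one_mul, pvCastPow]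
  congr 1
  exact pvPairEq I J N (by exact_mod_cast hij) (by exact_mod_cast hjn)
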